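-- pv_equiv track=rewrite | github.com/Nizarel/CodeCustodian | tests/fixtures/sample_repo/src/app.py | very_long_function
-- ===== SOURCE A (Python) =====
-- def very_long_function(value):
--     temp = value
--     for i in range(12):
--         if i % 2 == 0:
--             temp += i
--         else:
--             temp -= i
--     return temp
-- ===== SOURCE B (Python) =====
-- def very_long_function(value):
--     # Closed form: sum over range(12) of (+i for even i, -i for odd i) = 30 - 36 = -6
--     return value - 6
-- ===== Notes on version B (the rewrite author's own statement) =====
-- stated objective: simpler
-- what changed: Replaced the fixed-length alternating add/subtract loop with its closed-form net constant: return value - 6.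
import Mathlib
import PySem

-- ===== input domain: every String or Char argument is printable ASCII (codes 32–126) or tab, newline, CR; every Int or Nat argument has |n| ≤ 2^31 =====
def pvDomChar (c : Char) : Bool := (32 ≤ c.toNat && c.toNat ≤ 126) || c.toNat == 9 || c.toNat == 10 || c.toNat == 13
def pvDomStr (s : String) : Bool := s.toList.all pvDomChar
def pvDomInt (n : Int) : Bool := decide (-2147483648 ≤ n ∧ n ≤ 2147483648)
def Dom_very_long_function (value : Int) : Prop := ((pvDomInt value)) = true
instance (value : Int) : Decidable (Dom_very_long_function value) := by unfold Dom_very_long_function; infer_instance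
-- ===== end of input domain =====

-- B replaces A's fixed 12-iteration alternating loop with the closed-form constant `value - 6` (simpler).

-- ===== PORT A =====
def very_long_function (value : Int) : Int :=
  (PySem.List.pyRange 0 12 1).foldl
    (fun temp i => if i % 2 == 0 then temp + i else temp - i) value

-- ===== PORT B =====
def very_long_function_alt (value : Int) : Int := value - 6

-- ===== PRECONDITION & SPEC =====
def Spec_very_long_function (value : Int) (out : Int) : Prop := out = very_long_function_alt value
instance (value : Int) (out : Int) : Decidable (Spec_very_long_function value out) := by unfold Spec_very_long_function; infer_instance

-- ===== CLAIM (what is proved, stated in full; the proofs are below) =====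
def Claim_equal_very_long_function : Prop := ∀ (value : Int), Dom_very_long_function value → Spec_very_long_function value (very_long_function value)

-- ===== LEMMAS AND PROOFS =====

-- ===== VERDICT (by name: the statement is the Claim_ definition above) =====
theorem very_long_function_spec : Claim_equal_very_long_function := by
  intro value _
  show very_long_function value = very_long_function_alt value
  simp [very_long_function, very_long_function_alt, PySem.List.pyRange,
    List.range_succ]
  ring
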